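-- pv_equiv track=rewrite | github.com/edge-inference/token2metrics | decodenergy/empirical_data.py | extract_token_config
-- ===== SOURCE A (Python) =====
-- from typing import Dict, List, Tuple, Optional
--
-- def extract_token_config(filename: str) -> Tuple[Optional[int], Optional[int]]:
--     """Extract input and output tokens from filename"""
--     try:
--         # Parse patterns like: energy_synthetic_analysis_in128_out256_20250819_191357.csv
--         parts = filename.split('_')
--         input_tokens = None
--         output_tokens = None
--
--         for i, part in enumerate(parts):
--             if part.startswith('in') and part[2:].isdigit():
--                 input_tokens = int(part[2:])
--             elif part.startswith('out') and part[3:].isdigit():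
--                 output_tokens = int(part[3:])
--
--         return input_tokens, output_tokens
--     except:
--         return None, None
-- ===== SOURCE B (Python) =====
-- import re
--
-- # Anchored to underscore/string boundaries; [0-9]+ is exactly isdigit()+int() on ASCII input.
-- _IN = re.compile(r'(?:^|(?<=_))in([0-9]+)(?=_|\Z)')
-- _OUT = re.compile(r'(?:^|(?<=_))out([0-9]+)(?=_|\Z)')
--
-- def extract_token_config(filename):
--     """Extract input and output tokens from filename (regex scan; last match wins)."""
--     ins = _IN.findall(filename)
--     outs = _OUT.findall(filename)
--     return (int(ins[-1]) if ins else None, int(outs[-1]) if outs else None)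
-- ===== Notes on version B (the rewrite author's own statement) =====
-- stated objective: idiomatic
-- what changed: Replaces A's underscore-split plus enumerate loop over parts with two precompiled re.findall scans whose patterns are anchored to token boundaries, taking the last captured digit group for each prefix.
import Mathlib
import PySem

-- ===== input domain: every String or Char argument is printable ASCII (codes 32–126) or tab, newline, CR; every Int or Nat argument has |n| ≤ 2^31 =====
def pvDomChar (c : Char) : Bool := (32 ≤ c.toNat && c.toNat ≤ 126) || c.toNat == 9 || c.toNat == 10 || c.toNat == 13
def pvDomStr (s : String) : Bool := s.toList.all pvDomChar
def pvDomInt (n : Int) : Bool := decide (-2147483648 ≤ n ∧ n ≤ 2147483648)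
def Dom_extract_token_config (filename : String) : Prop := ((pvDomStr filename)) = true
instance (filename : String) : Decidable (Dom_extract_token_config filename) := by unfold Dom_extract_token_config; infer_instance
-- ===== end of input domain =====

-- B replaces A's split + enumerate loop with a regex scan (re.findall of the two anchored
-- patterns, last match wins): idiomatic, same cost.

-- ===== PORT A =====
-- A: split on '_', loop over the parts (enumerate; the index is unused), last matching part
-- wins; the in-branch is checked before the out-branch (elif).  int(part[k:]) is guarded by
-- isdigit, so PySem.Int.ofChars? is `some` there and the try/except path is dead; `.getD 0`
-- is that dead default.  (PySem.Chars.* on .toList = the Str wrappers, exact on ASCII.)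
def pvStepA (st : Option Int × Option Int) (ip : Int × List Char) : Option Int × Option Int :=
  if PySem.Chars.startswith ip.2 ['i', 'n'] &&
      PySem.Chars.strIsdigit (PySem.Chars.slice ip.2 (some 2) none) then
    (some ((PySem.Int.ofChars? (PySem.Chars.slice ip.2 (some 2) none)).getD 0), st.2)
  else if PySem.Chars.startswith ip.2 ['o', 'u', 't'] &&
      PySem.Chars.strIsdigit (PySem.Chars.slice ip.2 (some 3) none) then
    (st.1, some ((PySem.Int.ofChars? (PySem.Chars.slice ip.2 (some 3) none)).getD 0))
  else st

def extract_token_config (filename : String) : Option Int × Option Int :=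
  (PySem.List.enumerate (PySem.Chars.splitOn filename.toList ['_']) 0).foldl pvStepA (none, none)

-- ===== PORT B =====
-- Source B scans with re.findall(r'(?:^|(?<=_))in([0-9]+)(?=_|\Z)') (and the same with 'out').
-- PySem has no regex primitive, so re's left-to-right non-overlapping scan is ported by hand,
-- exact for this pattern: pvMatchAt tries the pattern at the current position (the greedy
-- digit run is the only candidate that can satisfy the (?=_|\Z) lookahead, so no backtracking),
-- pvFindall walks the positions; `b` holds iff the position is 0 or just after a '_' (the
-- (?:^|(?<=_)) anchor), and after a match the scan resumes at the match end.
def pvMatchAt (pfx cs : List Char) : Option (List Char × List Char) :=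
  if cs.take pfx.length = pfx ∧
      (cs.drop pfx.length).takeWhile PySem.Chars.isdigit ≠ [] ∧
      ((cs.drop pfx.length).dropWhile PySem.Chars.isdigit = [] ∨
        ((cs.drop pfx.length).dropWhile PySem.Chars.isdigit).head? = some '_') then
    some ((cs.drop pfx.length).takeWhile PySem.Chars.isdigit,
      (cs.drop pfx.length).dropWhile PySem.Chars.isdigit)
  else none

-- termination of the scan: a successful match consumes at least one character
theorem pvMatchAt_rem_lt {pfx cs ds rem : List Char}
    (h : pvMatchAt pfx cs = some (ds, rem)) : rem.length < cs.length := by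
  unfold pvMatchAt at h
  split at h
  · rename_i hcond
    rw [Option.some.injEq, Prod.mk.injEq] at h
    obtain ⟨rfl, rfl⟩ := h
    have hsplit : (cs.drop pfx.length).takeWhile PySem.Chars.isdigit
        ++ (cs.drop pfx.length).dropWhile PySem.Chars.isdigit = cs.drop pfx.length :=
      List.takeWhile_append_dropWhile
    have hlen := congrArg List.length hsplit
    simp only [List.length_append, List.length_drop] at hlen
    have hds : ((cs.drop pfx.length).takeWhile PySem.Chars.isdigit).length ≠ 0 := by
      simpa [List.length_eq_zero_iff] using hcond.2.1
    omega
  · exact absurd h (by simp)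

def pvFindall (pfx : List Char) (cs : List Char) (b : Bool) : List (List Char) :=
  match cs with
  | [] => []
  | c :: t =>
    if b then
      match h : pvMatchAt pfx (c :: t) with
      | some (ds, rem) => ds :: pvFindall pfx rem false
      | none => pvFindall pfx t (c == '_')
    else pvFindall pfx t (c == '_')
termination_by cs.length
decreasing_by
  · exact pvMatchAt_rem_lt h
  · simp
  · simp

def extract_token_config_alt (filename : String) : Option Int × Option Int :=
  ((pvFindall ['i', 'n'] filename.toList true).getLast?.map
      (fun ds => (PySem.Int.ofChars? ds).getD 0),
   (pvFindall ['o', 'u', 't'] filename.toList true).getLast?.map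
      (fun ds => (PySem.Int.ofChars? ds).getD 0))

-- ===== PRECONDITION & SPEC =====
def Spec_extract_token_config (filename : String) (out : Option Int × Option Int) : Prop := out = extract_token_config_alt filename
instance (filename : String) (out : Option Int × Option Int) : Decidable (Spec_extract_token_config filename out) := by unfold Spec_extract_token_config; infer_instance

-- ===== CLAIM (what is proved, stated in full; the proofs are below) =====
def Claim_equal_extract_token_config : Prop := ∀ (filename : String), Dom_extract_token_config filename → Spec_extract_token_config filename (extract_token_config filename)

-- ===== LEMMAS AND PROOFS =====

theorem digit_ne_underscore {c : Char} (h : PySem.Chars.isdigit c = true) : (c ≠ '_') := by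
  rcases eq_or_ne c '_' with rfl | hne
  · exact absurd h (by decide)
  · exact hne

theorem head_dropWhile_false {p : Char → Bool} {l : List Char} {c : Char}
    (h : (l.dropWhile p).head? = some c) : p c = false := by
  induction l with
  | nil => simp at h
  | cons a t ih =>
    rw [List.dropWhile_cons] at h
    split at h
    · exact ih h
    · simp only [List.head?_cons, Option.some.injEq] at h
      subst h
      rename_i hp
      exact Bool.not_eq_true _ ▸ hp

theorem takeWhile_head_eq_nil {p : Char → Bool} {l : List Char} {c : Char}
    (h : l.head? = some c) (hc : p c = false) : l.takeWhile p = [] := by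
  cases l with
  | nil => simp at h
  | cons a r =>
    have ha : a = c := by simpa using h
    subst ha
    rw [List.takeWhile_cons, hc]
    rfl

theorem dropWhile_head_eq_self {p : Char → Bool} {l : List Char} {c : Char}
    (h : l.head? = some c) (hc : p c = false) : l.dropWhile p = l := by
  cases l with
  | nil => simp at h
  | cons a r =>
    have ha : a = c := by simpa using h
    subst ha
    rw [List.dropWhile_cons, hc]
    rfl

theorem takeWhile_head_underscore {l : List Char} (h : l.head? = some '_') :
    l.takeWhile (· ≠ '_') = [] := takeWhile_head_eq_nil h (by decide)

theorem dropWhile_head_underscore {l : List Char} (h : l.head? = some '_') :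
    l.dropWhile (· ≠ '_') = l := dropWhile_head_eq_self h (by decide)

-- str.split('_') as a plain structural recursion (single-character separator)
def splitU : List Char → List (List Char)
  | [] => [[]]
  | c :: t =>
    if c = '_' then [] :: splitU t
    else
      match splitU t with
      | [] => [[c]]   -- unreachable: splitU never returns []
      | h :: tl => (c :: h) :: tl

theorem splitU_ne_nil (cs : List Char) : splitU cs ≠ [] := by
  cases cs with
  | nil => simp [splitU]
  | cons c t =>
    simp only [splitU]
    split
    · simp
    · cases h : splitU t <;> simp

theorem go_spec (fuel : Nat) : ∀ (l cur : List Char) (acc : List (List Char)) (h : List Char)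
    (tl : List (List Char)), splitU l = h :: tl → l.length ≤ fuel →
    PySem.Chars.splitOn.go ['_'] fuel l cur acc = acc.reverse ++ (cur.reverse ++ h) :: tl := by
  induction fuel with
  | zero =>
    intro l cur acc h tl hs hf
    have : l = [] := by cases l <;> simp_all
    subst this
    simp [splitU] at hs
    obtain ⟨rfl, rfl⟩ := hs
    simp [PySem.Chars.splitOn.go]
  | succ n ih =>
    intro l cur acc h tl hs hf
    cases l with
    | nil =>
      simp [splitU] at hs
      obtain ⟨rfl, rfl⟩ := hs
      simp [PySem.Chars.splitOn.go]
    | cons c rest =>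
      by_cases hc : c = '_'
      · subst hc
        simp only [splitU, if_true, List.cons.injEq] at hs
        obtain ⟨rfl, rfl⟩ := hs
        obtain ⟨h', tl', hrest⟩ : ∃ h' tl', splitU rest = h' :: tl' := by
          cases hsp : splitU rest with
          | nil => exact absurd hsp (splitU_ne_nil rest)
          | cons a b => exact ⟨a, b, rfl⟩
        have hpre : List.isPrefixOf ['_'] ('_' :: rest) = true := by simp [List.isPrefixOf]
        rw [PySem.Chars.splitOn.go]
        simp only [hpre, if_pos, List.length_cons, List.length_nil, List.drop_succ_cons,
          List.drop_zero]
        rw [ih rest [] ((cur.reverse) :: acc) h' tl' hrest (by simpa using hf)]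
        simp [hrest]
      · have hpre : List.isPrefixOf ['_'] (c :: rest) = false := by
          simp [List.isPrefixOf]; exact fun e => hc e.symm
        obtain ⟨h', tl', hrest⟩ : ∃ h' tl', splitU rest = h' :: tl' := by
          cases hsp : splitU rest with
          | nil => exact absurd hsp (splitU_ne_nil rest)
          | cons a b => exact ⟨a, b, rfl⟩
        simp only [splitU, if_neg hc, hrest, List.cons.injEq] at hs
        obtain ⟨rfl, rfl⟩ := hs
        rw [PySem.Chars.splitOn.go]
        simp only [hpre, Bool.false_eq_true, if_false]
        rw [ih rest (c :: cur) acc h' tl' hrest (by simpa using hf)]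
        simp

theorem splitOn_eq_splitU (cs : List Char) : PySem.Chars.splitOn cs ['_'] = splitU cs := by
  obtain ⟨h, tl, hs⟩ : ∃ h tl, splitU cs = h :: tl := by
    cases hsp : splitU cs with
    | nil => exact absurd hsp (splitU_ne_nil cs)
    | cons a b => exact ⟨a, b, rfl⟩
  rw [show PySem.Chars.splitOn cs ['_'] = PySem.Chars.splitOn.go ['_'] (cs.length + 1) cs [] [] from rfl]
  rw [go_spec (cs.length + 1) cs [] [] h tl hs (by omega)]
  simp [hs]

theorem splitU_decomp (cs : List Char) :
    splitU cs = (cs.takeWhile (· ≠ '_')) ::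
      (match cs.dropWhile (· ≠ '_') with
       | [] => []
       | _ :: r => splitU r) := by
  induction cs with
  | nil => simp [splitU]
  | cons c t ih =>
    by_cases hc : c = '_'
    · subst hc
      simp [splitU]
    · obtain ⟨h', tl', hrest⟩ : ∃ h' tl', splitU t = h' :: tl' := by
        cases hsp : splitU t with
        | nil => exact absurd hsp (splitU_ne_nil t)
        | cons a b => exact ⟨a, b, rfl⟩
      simp only [splitU, if_neg hc, hrest]
      rw [hrest] at ih
      simp only [List.cons.injEq] at ih
      simp [hc, ih.1, ih.2]

-- the token test both programs perform: part = pfx ++ (nonempty digit run)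
def pvCap (pfx part : List Char) : Option (List Char) :=
  if pfx.isPrefixOf part && PySem.Chars.strIsdigit (part.drop pfx.length) then
    some (part.drop pfx.length)
  else none

theorem matchAt_eq (pfx cs : List Char) (hp : ∀ c ∈ pfx, c ≠ '_') :
    pvMatchAt pfx cs =
      (pvCap pfx (cs.takeWhile (· ≠ '_'))).map (fun ds => (ds, cs.dropWhile (· ≠ '_'))) := by
  have hpall : pfx.takeWhile (· ≠ '_') = pfx :=
    List.takeWhile_eq_self_iff.mpr (by intro x hx; simpa using hp x hx)
  have hpdrop : pfx.dropWhile (· ≠ '_') = [] :=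
    List.dropWhile_eq_nil_iff.mpr (by intro x hx; simpa using hp x hx)
  by_cases htake : cs.take pfx.length = pfx
  case neg =>
    have h1 : pvMatchAt pfx cs = none := by
      unfold pvMatchAt; rw [if_neg]; intro hcond; exact htake hcond.1
    have h2 : pvCap pfx (cs.takeWhile (· ≠ '_')) = none := by
      unfold pvCap; rw [if_neg]; intro hcond
      have hpre : pfx <+: cs.takeWhile (· ≠ '_') :=
        List.isPrefixOf_iff_prefix.mp (Bool.and_eq_true .. ▸ hcond).1
      have : pfx <+: cs := hpre.trans (List.takeWhile_prefix _)
      exact htake (List.prefix_iff_eq_take.mp this).symm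
    rw [h1, h2]; rfl
  case pos =>
    have hcs : pfx ++ cs.drop pfx.length = cs := by
      conv_rhs => rw [← List.take_append_drop pfx.length cs, htake]
    have hT : cs.takeWhile (· ≠ '_') = pfx ++ (cs.drop pfx.length).takeWhile (· ≠ '_') := by
      conv_lhs => rw [← hcs]
      rw [List.takeWhile_append, if_pos (by rw [hpall])]
    have hR : cs.dropWhile (· ≠ '_') = (cs.drop pfx.length).dropWhile (· ≠ '_') := by
      conv_lhs => rw [← hcs]
      rw [List.dropWhile_append, if_pos (by rw [hpdrop]; rfl)]
    set rest := cs.drop pfx.length with hrestdef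
    by_cases hcond : rest.takeWhile PySem.Chars.isdigit ≠ [] ∧
        (rest.dropWhile PySem.Chars.isdigit = [] ∨
         (rest.dropWhile PySem.Chars.isdigit).head? = some '_')
    · set ds := rest.takeWhile PySem.Chars.isdigit with hds
      set rem := rest.dropWhile PySem.Chars.isdigit with hrem
      have hMa : pvMatchAt pfx cs = some (ds, rem) := by
        unfold pvMatchAt
        rw [if_pos ⟨htake, hcond.1, hcond.2⟩]
      have hds_all : ∀ c ∈ ds, PySem.Chars.isdigit c = true := by
        intro c hc; exact List.all_eq_true.mp List.all_takeWhile c hc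
      have hds_ne : ∀ c ∈ ds, (c ≠ '_') := fun c hc => digit_ne_underscore (hds_all c hc)
      have hdsrem : ds ++ rem = rest := List.takeWhile_append_dropWhile
      have hremtw : rem.takeWhile (· ≠ '_') = [] := by
        rcases hcond.2 with h0 | h0
        · rw [h0]; rfl
        · exact takeWhile_head_underscore h0
      have hremdw : rem.dropWhile (· ≠ '_') = rem := by
        rcases hcond.2 with h0 | h0
        · rw [h0]; rfl
        · exact dropWhile_head_underscore h0
      have htw : rest.takeWhile (· ≠ '_') = ds := by
        rw [← hdsrem, List.takeWhile_append,
          if_pos (by rw [List.takeWhile_eq_self_iff.mpr (by intro x hx; simpa using hds_ne x hx)]),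
          hremtw, List.append_nil]
      have hdw : rest.dropWhile (· ≠ '_') = rem := by
        rw [← hdsrem, List.dropWhile_append,
          if_pos (by rw [List.dropWhile_eq_nil_iff.mpr (by intro x hx; simpa using hds_ne x hx)]; rfl),
          hremdw]
      have hcap : pvCap pfx (cs.takeWhile (· ≠ '_')) = some ds := by
        rw [hT, htw]
        unfold pvCap
        rw [if_pos]
        · rw [List.drop_left]
        · rw [List.drop_left]
          refine Bool.and_eq_true .. ▸ ⟨List.isPrefixOf_iff_prefix.mpr (List.prefix_append _ _), ?_⟩
          unfold PySem.Chars.strIsdigit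
          refine Bool.and_eq_true .. ▸ ⟨?_, ?_⟩
          · simpa [List.isEmpty_iff] using hcond.1
          · exact List.all_takeWhile
      rw [hMa, hcap, Option.map_some, hR, hdw]
    · have hMa : pvMatchAt pfx cs = none := by
        unfold pvMatchAt
        rw [if_neg]
        intro hx
        exact hcond ⟨hx.2.1, hx.2.2⟩
      suffices hcap : pvCap pfx (cs.takeWhile (· ≠ '_')) = none by rw [hMa, hcap]; rfl
      unfold pvCap
      rw [if_neg]
      intro hc
      obtain ⟨hpre, hdig⟩ := Bool.and_eq_true .. ▸ hc
      rw [hT, List.drop_left] at hdig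
      set W := rest.takeWhile (· ≠ '_') with hW
      set R0 := rest.dropWhile (· ≠ '_') with hR0
      simp only [PySem.Chars.strIsdigit, Bool.and_eq_true] at hdig
      obtain ⟨hWne, hWall⟩ := hdig
      have hWallM : ∀ c ∈ W, PySem.Chars.isdigit c = true := List.all_eq_true.mp hWall
      have hWR : W ++ R0 = rest := List.takeWhile_append_dropWhile
      have hR0cases : R0 = [] ∨ R0.head? = some '_' := by
        cases hh : R0.head? with
        | none => exact Or.inl (List.head?_eq_none_iff.mp hh)
        | some c =>
          have hcu : c = '_' := by
            have := head_dropWhile_false (hR0 ▸ hh)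
            simpa using this
          exact Or.inr (congrArg some hcu)
      have hR0tw : R0.takeWhile PySem.Chars.isdigit = [] := by
        rcases hR0cases with h0 | h0
        · rw [h0]; rfl
        · exact takeWhile_head_eq_nil h0 (by decide)
      have hR0dw : R0.dropWhile PySem.Chars.isdigit = R0 := by
        rcases hR0cases with h0 | h0
        · rw [h0]; rfl
        · exact dropWhile_head_eq_self h0 (by decide)
      have h1 : rest.takeWhile PySem.Chars.isdigit = W := by
        rw [← hWR, List.takeWhile_append,
          if_pos (by rw [List.takeWhile_eq_self_iff.mpr hWallM]), hR0tw, List.append_nil]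
      have h2 : rest.dropWhile PySem.Chars.isdigit = R0 := by
        rw [← hWR, List.dropWhile_append,
          if_pos (by rw [List.dropWhile_eq_nil_iff.mpr hWallM]; rfl), hR0dw]
      exact hcond ⟨by rw [h1]; simpa [List.isEmpty_iff] using hWne, by rw [h2]; exact hR0cases⟩

theorem pvFindall_eq (pfx : List Char) (hp : ∀ c ∈ pfx, c ≠ '_') (hne : pfx ≠ []) :
    ∀ (cs : List Char) (b : Bool),
      pvFindall pfx cs b = ((if b then splitU cs else (splitU cs).tail).filterMap (pvCap pfx)) := by
  intro cs b
  induction cs, b using pvFindall.induct pfx with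
  | case1 b =>
    cases pfx with
    | nil => exact absurd rfl hne
    | cons p q =>
      cases b <;> simp [pvFindall, splitU, pvCap]
  | case2 c t ds rem hm ih =>
    have hme := matchAt_eq pfx (c :: t) hp
    rw [hm] at hme
    have hcapT : pvCap pfx ((c :: t).takeWhile (· ≠ '_')) = some ds ∧
        (c :: t).dropWhile (· ≠ '_') = rem := by
      cases hcap : pvCap pfx ((c :: t).takeWhile (· ≠ '_')) with
      | none => rw [hcap] at hme; exact absurd hme.symm (by simp)
      | some w =>
        rw [hcap] at hme
        simp only [Option.map_some, Option.some.injEq, Prod.mk.injEq] at hme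
        exact ⟨by rw [hme.1], hme.2.symm⟩
    have hlist : (splitU rem).tail = (match (c :: t).dropWhile (· ≠ '_') with
        | [] => ([] : List (List Char)) | _ :: r => splitU r) := by
      rw [hcapT.2]
      cases hrem : rem with
      | nil => simp [splitU]
      | cons a r =>
        have ha : a = '_' := by
          have h1 := head_dropWhile_false (p := fun x => decide (x ≠ '_')) (l := c :: t) (c := a)
            (by rw [hcapT.2, hrem]; rfl)
          simpa using h1
        subst ha
        simp [splitU]
    rw [pvFindall]
    simp only [if_true]
    split
    case _ ds' rem' heq =>
      rw [hm, Option.some.injEq, Prod.mk.injEq] at heq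
      obtain ⟨rfl, rfl⟩ := heq
      rw [ih, splitU_decomp (c :: t)]
      simp only [List.filterMap_cons, hcapT.1, ← hlist]
      simp
    case _ heq =>
      rw [hm] at heq
      exact absurd heq (by simp)
  | case3 c t hm ih =>
    have hme := matchAt_eq pfx (c :: t) hp
    rw [hm] at hme
    have hcap : pvCap pfx ((c :: t).takeWhile (· ≠ '_')) = none := by
      cases hcap : pvCap pfx ((c :: t).takeWhile (· ≠ '_')) with
      | none => rfl
      | some w => rw [hcap] at hme; exact absurd hme.symm (by simp)
    rw [pvFindall]
    simp only [if_true]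
    split
    case _ ds' rem' heq =>
      rw [hm] at heq
      exact absurd heq.symm (by simp)
    case _ heq =>
      rw [ih, splitU_decomp (c :: t)]
      simp only [List.filterMap_cons, hcap]
      by_cases hc : c = '_'
      · subst hc
        simp
      · have hcb : (c == '_') = false := by simpa using hc
        rw [hcb, List.dropWhile_cons]
        rw [if_pos (show (decide (c ≠ '_')) = true by simpa using hc), splitU_decomp t]
        simp
  | case4 b c t hb ih =>
    have hbf : b = false := by simpa using hb
    subst hbf
    rw [pvFindall]
    simp only [Bool.false_eq_true, if_false]
    rw [ih, splitU_decomp (c :: t)]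
    simp only [List.tail_cons]
    by_cases hc : c = '_'
    · subst hc
      simp
    · have hcb : (c == '_') = false := by simpa using hc
      rw [hcb, List.dropWhile_cons]
      rw [if_pos (show (decide (c ≠ '_')) = true by simpa using hc), splitU_decomp t]
      simp

-- ===== A-side: the fold keeps the LAST matching part =====

def pvVal (ds : List Char) : Int := (PySem.Int.ofChars? ds).getD 0

def pvLastVal (l : List (List Char)) (init : Option Int) : Option Int :=
  match l.getLast? with
  | some ds => some (pvVal ds)
  | none => init

theorem pvLastVal_cons (ds : List Char) (l : List (List Char)) (init : Option Int) :
    pvLastVal (ds :: l) init = pvLastVal l (some (pvVal ds)) := by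
  unfold pvLastVal
  rw [List.getLast?_cons]
  cases h : l.getLast? <;> simp

theorem cap_in_not_out (p : List Char) {ds : List Char}
    (h : pvCap ['i', 'n'] p = some ds) : pvCap ['o', 'u', 't'] p = none := by
  unfold pvCap at h ⊢
  rw [if_neg]
  intro hc
  obtain ⟨hpre, -⟩ := Bool.and_eq_true .. ▸ hc
  obtain ⟨q, rfl⟩ := List.isPrefixOf_iff_prefix.mp hpre
  split at h
  · rename_i hcond
    obtain ⟨hpre', -⟩ := Bool.and_eq_true .. ▸ hcond
    obtain ⟨r, hr⟩ := List.isPrefixOf_iff_prefix.mp hpre'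
    simp at hr
  · exact absurd h (by simp)

theorem slice_drop (part : List Char) (k : Nat) :
    PySem.Chars.slice part (some (k : Int)) none = part.drop k := by
  rw [PySem.Chars.slice_eq_listSlice, PySem.List.slice_from_natCast]

theorem foldA_spec (parts : List (List Char)) : ∀ (s : Int) (init : Option Int × Option Int),
    (PySem.List.enumerate parts s).foldl pvStepA init =
      (pvLastVal (parts.filterMap (pvCap ['i', 'n'])) init.1,
       pvLastVal (parts.filterMap (pvCap ['o', 'u', 't'])) init.2) := by
  induction parts with
  | nil => intro s init; simp [PySem.List.enumerate_nil, pvLastVal]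
  | cons p ps ih =>
    intro s init
    rw [PySem.List.enumerate_cons, List.foldl_cons]
    have hsl2 : PySem.Chars.slice p (some 2) none = p.drop 2 := by
      have := slice_drop p 2; norm_num at this ⊢; exact this
    have hsl3 : PySem.Chars.slice p (some 3) none = p.drop 3 := by
      have := slice_drop p 3; norm_num at this ⊢; exact this
    have hstep : pvStepA init (s, p) =
        (match pvCap ['i', 'n'] p with
         | some ds => some (pvVal ds)
         | none => init.1,
         match pvCap ['i', 'n'] p, pvCap ['o', 'u', 't'] p with
         | none, some ds => some (pvVal ds)
         | _, _ => init.2) := by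
      unfold pvStepA pvCap pvVal
      simp only [PySem.Chars.startswith, hsl2, hsl3,
        show (['i', 'n'] : List Char).length = 2 from rfl,
        show (['o', 'u', 't'] : List Char).length = 3 from rfl]
      by_cases h1 : (['i', 'n'].isPrefixOf p && PySem.Chars.strIsdigit (p.drop 2)) = true
      · simp only [h1]
        simp
      · simp only [Bool.not_eq_true] at h1
        simp only [h1]
        by_cases h2 : (['o', 'u', 't'].isPrefixOf p && PySem.Chars.strIsdigit (p.drop 3)) = true
        · simp only [h2]
          simp
        · simp only [Bool.not_eq_true] at h2
          simp only [h2]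
          simp
    rw [hstep, ih]
    cases hin : pvCap ['i', 'n'] p with
    | some ds =>
      have hout : pvCap ['o', 'u', 't'] p = none := cap_in_not_out p hin
      simp only [List.filterMap_cons, hin, hout, pvLastVal_cons]
    | none =>
      cases hout : pvCap ['o', 'u', 't'] p with
      | some ds => simp only [List.filterMap_cons, hin, hout, pvLastVal_cons]
      | none => simp only [List.filterMap_cons, hin, hout]

-- ===== VERDICT (by name: the statement is the Claim_ definition above) =====
theorem extract_token_config_spec : Claim_equal_extract_token_config := by
  unfold Claim_equal_extract_token_config
  intro filename _
  unfold Spec_extract_token_config extract_token_config extract_token_config_alt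
  rw [foldA_spec, splitOn_eq_splitU]
  rw [pvFindall_eq ['i', 'n'] (by intro c hc; simp only [List.mem_cons, List.not_mem_nil, or_false] at hc; rcases hc with rfl | rfl <;> decide) (by simp),
    pvFindall_eq ['o', 'u', 't'] (by intro c hc; simp only [List.mem_cons, List.not_mem_nil, or_false] at hc; rcases hc with rfl | rfl | rfl <;> decide) (by simp)]
  simp only [if_true]
  have hcomp : ∀ (l : List (List Char)),
      pvLastVal l none = l.getLast?.map (fun ds => (PySem.Int.ofChars? ds).getD 0) := by
    intro l; unfold pvLastVal pvVal; cases h : l.getLast? <;> simp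
  rw [hcomp, hcomp]
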